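-- pv_equiv track=rewrite | github.com/mario-bermonti/wdiff | wanalysis.py | swap_g_for_j_check
-- ===== SOURCE A (Python) =====
-- def swap_g_for_j_check(word):
--     """Checks how many g's in the word word sound like j's so they could be
--     swapped with j's by mistake.
--     """
--
--     gCompliantCount = 0
--     gCount = word.count("g")
--     gPositions = list()
--     start = 0
--
--     while gCount > 0:
--         gPosition = word.find("g", start)
--         gPositions.append(gPosition)
--         start = gPosition + 1
--         gCount -= 1
--
--     for position in gPositions:
--         if position == (len(word) - 1):
--             continue
--         if word[position+1] == 'i' or word[position+1] == "e":
--             gCompliantCount += 1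
--
--     return gCompliantCount
-- ===== SOURCE B (Python) =====
-- def swap_g_for_j_check(word):
--     """Checks how many g's in the word word sound like j's so they could be
--     swapped with j's by mistake.
--     """
--     count = 0
--     for cur, nxt in zip(word, word[1:]):
--         if cur == 'g' and (nxt == 'i' or nxt == 'e'):
--             count += 1
--     return count
-- ===== Notes on version B (the rewrite author's own statement) =====
-- stated objective: simpler
-- what changed: A first materializes the list of all g-positions with repeated str.find calls in a while loop and then re-scans that list checking the following character; B is a single pass over adjacent character pairs keeping only a running count.
import Mathlib
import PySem

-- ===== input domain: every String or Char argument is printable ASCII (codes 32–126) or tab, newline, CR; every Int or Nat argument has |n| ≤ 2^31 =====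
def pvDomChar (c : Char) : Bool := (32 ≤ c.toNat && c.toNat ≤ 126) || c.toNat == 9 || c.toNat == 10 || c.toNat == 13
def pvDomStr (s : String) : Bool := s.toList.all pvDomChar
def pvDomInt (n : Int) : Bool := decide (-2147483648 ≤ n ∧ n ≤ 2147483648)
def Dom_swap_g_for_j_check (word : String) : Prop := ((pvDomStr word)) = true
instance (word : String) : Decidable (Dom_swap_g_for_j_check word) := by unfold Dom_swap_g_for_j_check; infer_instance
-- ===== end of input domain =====

-- B replaces A's two-phase structure (materialize all g-positions via repeated str.find, then re-scan them)
-- by a single pass over adjacent character pairs keeping only a running count; objective: simpler.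

-- ===== PORT A =====
-- the 'while gCount > 0' loop: runs exactly gCount times, appending word.find("g", start)
def pvGPosLoop (word : String) : Nat → Int → List Int
  | 0, _ => []
  | Nat.succ n, start =>
    let gPosition := PySem.Str.findFrom word "g" start none
    gPosition :: pvGPosLoop word n (gPosition + 1)

def swap_g_for_j_check (word : String) : Int :=
  let gCount := PySem.Str.count word "g"
  let gPositions := pvGPosLoop word gCount 0
  gPositions.foldl (fun gCompliantCount position =>
    if position = PySem.Str.len word - 1 then gCompliantCount
    else
      -- word[position+1]: pyGet?; the none (IndexError) branch is unreachable, every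
      -- position is a 'g'-index other than the last index of the word
      match PySem.Str.pyGet? word (position + 1) with
      | some c => if c = 'i' ∨ c = 'e' then gCompliantCount + 1 else gCompliantCount
      | none => gCompliantCount) 0

-- ===== PORT B =====
def swap_g_for_j_check_alt (word : String) : Int :=
  (word.toList.zip word.toList.tail).foldl
    (fun count p => if p.1 = 'g' ∧ (p.2 = 'i' ∨ p.2 = 'e') then count + 1 else count) 0

-- ===== PRECONDITION & SPEC =====
def Spec_swap_g_for_j_check (word : String) (out : Int) : Prop := out = swap_g_for_j_check_alt word
instance (word : String) (out : Int) : Decidable (Spec_swap_g_for_j_check word out) := by unfold Spec_swap_g_for_j_check; infer_instance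

-- ===== CLAIM (what is proved, stated in full; the proofs are below) =====
def Claim_equal_swap_g_for_j_check : Prop := ∀ (word : String), Dom_swap_g_for_j_check word → Spec_swap_g_for_j_check word (swap_g_for_j_check word)

-- ===== LEMMAS AND PROOFS =====

-- the indices of 'g' in a character list, in order
def gIdx : List Char → List Nat
  | [] => []
  | c :: cs => if c = 'g' then 0 :: (gIdx cs).map (· + 1) else (gIdx cs).map (· + 1)

lemma gIdx_nil_of_not_mem (cs : List Char) (h : 'g' ∉ cs) : gIdx cs = [] := by
  induction cs with
  | nil => rfl
  | cons c cs ih =>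
    simp only [List.mem_cons, not_or] at h
    simp [gIdx, Ne.symm h.1, ih h.2]

lemma gIdx_append (p r : List Char) (hp : 'g' ∉ p) :
    gIdx (p ++ 'g' :: r) = p.length :: (gIdx r).map (· + (p.length + 1)) := by
  induction p with
  | nil => simp [gIdx]
  | cons c p ih =>
    simp only [List.mem_cons, not_or] at hp
    simp only [List.cons_append, gIdx, if_neg (Ne.symm hp.1), ih hp.2]
    simp [List.map_map]

lemma count_go_spec : ∀ (l : List Char) (fuel acc : Nat), l.length ≤ fuel →
    PySem.Chars.count.go ['g'] fuel l acc = acc + l.count 'g' := by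
  intro l
  induction l with
  | nil => intro fuel acc _; cases fuel <;> simp [PySem.Chars.count.go]
  | cons c t ih =>
    intro fuel acc hf
    cases fuel with
    | zero => simp at hf
    | succ fuel =>
      simp only [List.length_cons, Nat.succ_le_succ_iff] at hf
      by_cases hc : c = 'g'
      · subst hc
        simp [PySem.Chars.count.go, List.isPrefixOf, ih _ _ hf]
        omega
      · simp [PySem.Chars.count.go, List.isPrefixOf, hc, Ne.symm hc, ih _ _ hf]

lemma count_char (t : List Char) : PySem.Chars.count t ['g'] = t.count 'g' := by
  simpa [PySem.Chars.count] using count_go_spec t t.length 0 le_rfl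

lemma find_go_spec : ∀ (p : List Char) (r : List Char) (k : Nat), 'g' ∉ p →
    PySem.Chars.find.go ['g'] (p ++ 'g' :: r) k = ((k + p.length : Nat) : Int) := by
  intro p
  induction p with
  | nil => intro r k _; simp [PySem.Chars.find.go, List.isPrefixOf]
  | cons c p ih =>
    intro r k hp
    simp only [List.mem_cons, not_or] at hp
    simp only [List.cons_append, PySem.Chars.find.go, List.isPrefixOf,
      BEq.beq]
    rw [if_neg (by simp [hp.1])]
    rw [ih r (k + 1) hp.2]
    simp only [List.length_cons]
    push_cast
    ring

lemma find_first (p r : List Char) (hp : 'g' ∉ p) :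
    PySem.Chars.find (p ++ 'g' :: r) ['g'] = (p.length : Int) := by
  simpa using find_go_spec p r 0 hp

lemma first_g (t : List Char) (h : 'g' ∈ t) : ∃ p r, t = p ++ 'g' :: r ∧ 'g' ∉ p := by
  induction t with
  | nil => simp at h
  | cons c t ih =>
    by_cases hc : c = 'g'
    · exact ⟨[], t, by simp [hc], by simp⟩
    · rcases ih (by rcases List.mem_cons.mp h with h | h; exact absurd h.symm hc; exact h) with ⟨p, r, ht, hp⟩
      exact ⟨c :: p, r, by simp [ht], by simp [hp, Ne.symm hc]⟩

lemma gstr : "g".toList = ['g'] := rfl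

lemma pos_spec (word : String) : ∀ (n : Nat) (k : Nat), k ≤ word.toList.length →
    (word.toList.drop k).count 'g' = n →
    pvGPosLoop word n (k : Int) = (gIdx (word.toList.drop k)).map (fun j => ((k + j : Nat) : Int)) := by
  intro n
  induction n with
  | zero =>
    intro k _ hcnt
    rw [gIdx_nil_of_not_mem _ (by simpa using List.count_eq_zero.mp hcnt)]
    rfl
  | succ n ih =>
    intro k hk hcnt
    have hmem : 'g' ∈ word.toList.drop k := by
      by_contra h
      rw [List.count_eq_zero.mpr h] at hcnt
      omega
    obtain ⟨p, r, ht, hp⟩ := first_g _ hmem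
    have hfind : PySem.Str.findFrom word "g" (k : Int) none = ((k + p.length : Nat) : Int) := by
      rw [PySem.Str.findFrom_eq, gstr, PySem.Chars.findFrom_natCast _ _ k hk, ht,
        find_first p r hp]
      rw [if_neg (show ¬ (p.length : Int) = -1 by omega)]
      push_cast; ring
    have hlen : k + p.length + 1 ≤ word.toList.length := by
      have h3 := congrArg List.length ht
      rw [List.length_drop, List.length_append, List.length_cons] at h3
      omega
    have hdrop : word.toList.drop (k + p.length + 1) = r := by
      have : word.toList.drop (k + p.length + 1) =
          (word.toList.drop k).drop (p.length + 1) := by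
        rw [List.drop_drop]; ring_nf
      rw [this, ht]
      simp
    have hcr : r.count 'g' = n := by
      rw [ht] at hcnt
      simp [List.count_append, List.count_eq_zero.mpr hp] at hcnt
      omega
    show (PySem.Str.findFrom word "g" (k : Int) none) ::
        pvGPosLoop word n (PySem.Str.findFrom word "g" (k : Int) none + 1) = _
    rw [hfind, ht, gIdx_append p r hp]
    have h1 : ((k + p.length : Nat) : Int) + 1 = ((k + p.length + 1 : Nat) : Int) := by push_cast; ring
    rw [h1, ih (k + p.length + 1) hlen (by rw [hdrop]; exact hcr), hdrop]
    rw [List.map_cons, List.map_map]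
    refine congrArg₂ _ rfl (List.map_congr_left fun j _ => ?_)
    simp only [Function.comp_apply]
    push_cast
    ring

-- the Boolean predicate A's second loop tests at an (integer) position
def pABody (word : String) (pos : Int) : Bool :=
  !decide (pos = PySem.Str.len word - 1) &&
  (match PySem.Str.pyGet? word (pos + 1) with
   | some c => decide (c = 'i' ∨ c = 'e')
   | none => false)

lemma foldA (word : String) (l : List Int) :
    l.foldl (fun gCompliantCount position =>
      if position = PySem.Str.len word - 1 then gCompliantCount
      else
        match PySem.Str.pyGet? word (position + 1) with
        | some c => if c = 'i' ∨ c = 'e' then gCompliantCount + 1 else gCompliantCount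
        | none => gCompliantCount) 0 = ((l.countP (pABody word) : Nat) : Int) := by
  have hbody : (fun (gCompliantCount : Int) (position : Int) =>
      if position = PySem.Str.len word - 1 then gCompliantCount
      else
        match PySem.Str.pyGet? word (position + 1) with
        | some c => if c = 'i' ∨ c = 'e' then gCompliantCount + 1 else gCompliantCount
        | none => gCompliantCount) =
      (fun acc x => if pABody word x = true then acc + 1 else acc) := by
    funext acc pos
    unfold pABody
    simp only [PySem.Str.len_eq]
    by_cases h1 : pos = (word.toList.length : Int) - 1
    · simp [h1]
    · have h1' : ¬ pos = (word.length : Int) - 1 := by simpa using h1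
      cases h2 : PySem.Str.pyGet? word (pos + 1) with
      | none => rw [if_neg h1]; simp [h1']
      | some c =>
        rw [if_neg h1]
        by_cases h3 : c = 'i' ∨ c = 'e' <;> simp [h1', h3]
  rw [hbody, PySem.List.foldl_count_if]
  simp

def pB (p : Char × Char) : Bool := decide (p.1 = 'g' ∧ (p.2 = 'i' ∨ p.2 = 'e'))

lemma foldB (word : String) :
    swap_g_for_j_check_alt word =
      (((word.toList.zip word.toList.tail).countP pB : Nat) : Int) := by
  unfold swap_g_for_j_check_alt
  have hbody : (fun (count : Int) (p : Char × Char) =>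
      if p.1 = 'g' ∧ (p.2 = 'i' ∨ p.2 = 'e') then count + 1 else count) =
      (fun acc x => if pB x = true then acc + 1 else acc) := by
    funext acc p
    by_cases h : p.1 = 'g' ∧ (p.2 = 'i' ∨ p.2 = 'e') <;> simp [h, pB]
  rw [hbody, PySem.List.foldl_count_if]
  simp

-- predicate A tests, pulled back to a natural g-index of cs
def pAN (cs : List Char) (j : Nat) : Bool :=
  !decide ((j : Int) = (cs.length : Int) - 1) &&
  (match cs[j+1]? with
   | some c => decide (c = 'i' ∨ c = 'e')
   | none => false)

lemma pABody_natCast (word : String) (j : Nat) :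
    pABody word ((j : Nat) : Int) = pAN word.toList j := by
  unfold pABody pAN
  have h1 : ((j : Int) + 1) = ((j + 1 : Nat) : Int) := by push_cast; ring
  rw [h1]
  have h2 : PySem.Str.pyGet? word ((j + 1 : Nat) : Int) = word.toList[j+1]? := by
    show PySem.Chars.pyGet? word.toList _ = _
    show PySem.List.pyGet? word.toList _ = _
    exact PySem.List.pyGet?_natCast _ _
  rw [h2, PySem.Str.len_eq]

lemma main_count : ∀ cs : List Char,
    (gIdx cs).countP (pAN cs) = (cs.zip cs.tail).countP pB := by
  intro cs
  induction cs with
  | nil => rfl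
  | cons c cs ih =>
    have hpan : ∀ j : Nat, pAN (c :: cs) (j + 1) = pAN cs j := by
      intro j
      have hiff : ((j + 1 : Nat) : Int) = (((c :: cs).length : Nat) : Int) - 1 ↔
          ((j : Nat) : Int) = ((cs.length : Nat) : Int) - 1 := by
        simp only [List.length_cons]
        push_cast
        constructor <;> (intro h; omega)
      unfold pAN
      rw [List.getElem?_cons_succ, decide_eq_decide.mpr hiff]
    have hshift : ((gIdx cs).map (· + 1)).countP (pAN (c :: cs)) =
        (gIdx cs).countP (pAN cs) := by
      rw [List.countP_map]
      refine List.countP_congr fun j hj => ?_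
      rw [Function.comp_apply, hpan j]
    cases cs with
    | nil =>
      by_cases hc : c = 'g' <;> simp [gIdx, hc, pAN]
    | cons d cs' =>
      have hzip : ((c :: d :: cs').zip (c :: d :: cs').tail) =
          (c, d) :: ((d :: cs').zip (d :: cs').tail) := rfl
      rw [hzip, List.countP_cons]
      by_cases hc : c = 'g'
      · rw [show gIdx (c :: d :: cs') = 0 :: (gIdx (d :: cs')).map (· + 1) by
          simp [gIdx, hc]]
        rw [List.countP_cons]
        rw [hshift, ih]
        have hhead : pAN (c :: d :: cs') 0 = pB (c, d) := by
          unfold pAN pB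
          simp [hc]
          intro _
          omega
        rw [hhead]
      · rw [show gIdx (c :: d :: cs') = (gIdx (d :: cs')).map (· + 1) by
          simp [gIdx, hc]]
        rw [hshift, ih]
        have : pB (c, d) = false := by simp [pB, hc]
        simp [this]

-- ===== VERDICT (by name: the statement is the Claim_ definition above) =====
theorem swap_g_for_j_check_spec : Claim_equal_swap_g_for_j_check := by
  intro word _
  show swap_g_for_j_check word = swap_g_for_j_check_alt word
  have hcount : PySem.Str.count word "g" = word.toList.count 'g' := by
    show PySem.Chars.count word.toList "g".toList = _
    rw [gstr, count_char]
  have hpos := pos_spec word (word.toList.count 'g') 0 (Nat.zero_le _) (by simp)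
  simp only [List.drop_zero, Nat.cast_zero] at hpos
  show (pvGPosLoop word (PySem.Str.count word "g") 0).foldl
    (fun gCompliantCount position =>
      if position = PySem.Str.len word - 1 then gCompliantCount
      else
        match PySem.Str.pyGet? word (position + 1) with
        | some c => if c = 'i' ∨ c = 'e' then gCompliantCount + 1 else gCompliantCount
        | none => gCompliantCount) 0 = swap_g_for_j_check_alt word
  rw [hcount, hpos, foldA, List.countP_map]
  have hx : ∀ j : Nat, pABody word ((0 + j : Nat) : Int) = pAN word.toList j := by
    intro j
    rw [Nat.zero_add, pABody_natCast]
  have hcongr : (gIdx word.toList).countP ((pABody word) ∘ (fun j => ((0 + j : Nat) : Int))) =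
      (gIdx word.toList).countP (pAN word.toList) := by
    refine List.countP_congr fun j _ => ?_
    rw [Function.comp_apply, hx j]
  rw [hcongr, main_count, foldB]
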